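-- pv_equiv track=rewrite | github.com/VincentQTran/multievolve | multievolve/utils/featurizer_utils.py | msa_splicer
-- ===== SOURCE A (Python) =====
-- from typing import Tuple, List
--
-- def msa_splicer(msa: List[Tuple[str, str]]) -> List[Tuple[str, str]]:
--     """
--     Splice the MSA into only positions where the first sequence is (remove extra positions in the MSA).
--
--     Args:
--         msa (List[Tuple[str, str]]): List of tuples containing description and sequence.
--
--     Returns:
--         List[Tuple[str, str]]: List of spliced sequences.
--     """
--     # Get the positions where the first sequence in the MSA is not empty
--     base_sequence = msa[0][1]
--     positions = [i for i, _ in enumerate(base_sequence) if base_sequence[i] != '-']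
--
--     # Apply the positions over the entire MSA
--     spliced_msa = []
--     for name, seq in msa:
--         spliced_seq = [seq[i] for i in positions]
--         spliced_msa.append((name, ''.join(spliced_seq)))
--
--     return spliced_msa
-- ===== SOURCE B (Python) =====
-- from typing import Tuple, List
--
-- def msa_splicer(msa: List[Tuple[str, str]]) -> List[Tuple[str, str]]:
--     # Column-major: one sweep over the base sequence; for each non-gap column,
--     # append that column's character to every row's accumulator at once.
--     base_sequence = msa[0][1]
--     accs = [[] for _ in msa]
--     for i, b in enumerate(base_sequence):
--         if b != '-':
--             for acc, (_, seq) in zip(accs, msa):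
--                 acc.append(seq[i])
--     return [(name, ''.join(acc)) for (name, _), acc in zip(msa, accs)]
-- ===== Notes on version B (the rewrite author's own statement) =====
-- stated objective: alternative
-- what changed: Replaces A's row-major strategy (precompute the non-gap index list, then gather each row by index) with a column-major sweep: one pass over the base sequence that, at each non-gap column, appends that column's character to every row's accumulator simultaneously; no index list exists.
import Mathlib
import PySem

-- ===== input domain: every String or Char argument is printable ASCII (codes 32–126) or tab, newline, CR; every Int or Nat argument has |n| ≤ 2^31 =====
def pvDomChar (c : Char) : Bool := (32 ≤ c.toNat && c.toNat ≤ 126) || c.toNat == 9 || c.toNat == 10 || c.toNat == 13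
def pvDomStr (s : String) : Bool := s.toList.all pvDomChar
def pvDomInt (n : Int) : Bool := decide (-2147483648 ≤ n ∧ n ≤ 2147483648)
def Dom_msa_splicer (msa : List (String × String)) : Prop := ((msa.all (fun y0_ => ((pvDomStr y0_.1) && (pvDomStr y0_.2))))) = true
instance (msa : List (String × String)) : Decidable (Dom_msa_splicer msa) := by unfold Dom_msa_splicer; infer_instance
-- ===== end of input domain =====

-- B replaces A's row-major gather through a precomputed non-gap index list with a
-- column-major sweep that grows all rows' accumulators at once (alternative; same cost).

-- ===== PORT A =====
-- A: positions = indices of non-gap chars of the base; each row gathers seq[i] for those i.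
def msa_splicer (msa : List (String × String)) : List (String × String) :=
  match msa with
  | [] => []   -- Python raises IndexError on msa[0]; excluded by Pre_
  | (_, base) :: _ =>
    let b := base.toList
    let positions := (List.range b.length).filter (fun i => b.getD i ' ' ≠ '-')
    msa.map (fun p => (p.1, String.ofList (positions.filterMap (fun i => p.2.toList[i]?))))
    -- seq[i] raises IndexError out of range; Pre_ guarantees every position is in range, so filterMap drops nothing

-- ===== PORT B =====
-- B's column loop `for i, b in enumerate(base): if b != '-': append seq[i] to every acc`
-- as structural recursion over the base with an index counter.
def pvColLoop (msa : List (String × String)) : List Char → Nat → List (List Char) → List (List Char)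
  | [], _, accs => accs
  | c :: rest, i, accs =>
      pvColLoop msa rest (i + 1)
        (if c = '-' then accs
         else List.zipWith (fun acc p => acc ++ (p.2.toList[i]?).toList) accs msa)
        -- seq[i] raises IndexError out of range; inside Pre_ every index hit is in range, so toList drops nothing

def msa_splicer_alt (msa : List (String × String)) : List (String × String) :=
  match msa with
  | [] => []   -- Python raises IndexError on msa[0]; excluded by Pre_
  | (_, base) :: _ =>
      List.zipWith (fun p acc => (p.1, String.ofList acc)) msa
        (pvColLoop msa base.toList 0 (msa.map (fun _ => ([] : List Char))))

-- ===== PRECONDITION & SPEC =====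
-- Pre_: msa non-empty (else A raises IndexError on msa[0]) and every row long enough to cover
-- every non-gap position of the base (else seq[i] raises IndexError in both A and B).
def Pre_msa_splicer (msa : List (String × String)) : Prop :=
  msa ≠ [] ∧
  ∀ p ∈ msa, ∀ i ∈ List.range (msa.headD ("", "")).2.toList.length,
    (msa.headD ("", "")).2.toList.getD i ' ' ≠ '-' → i < p.2.toList.length
instance (msa : List (String × String)) : Decidable (Pre_msa_splicer msa) := by
  unfold Pre_msa_splicer; infer_instance
def pvWitness_msa_splicer : (List (String × String)) := [("a", "A-B"), ("b", "XYZ")]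

def Spec_msa_splicer (msa : List (String × String)) (out : List (String × String)) : Prop := out = msa_splicer_alt msa
instance (msa : List (String × String)) (out : List (String × String)) : Decidable (Spec_msa_splicer msa out) := by unfold Spec_msa_splicer; infer_instance

-- ===== CLAIM (what is proved, stated in full; the proofs are below) =====
def Claim_equal_msa_splicer : Prop := ∀ (msa : List (String × String)), Dom_msa_splicer msa → Pre_msa_splicer msa → Spec_msa_splicer msa (msa_splicer msa)

-- ===== LEMMAS AND PROOFS =====

-- What column i onward contributes to one row s, as a straight-line gather.
def pvGather (b : List Char) (i : Nat) (s : List Char) : List Char :=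
  match b with
  | [] => []
  | c :: rest => (if c = '-' then [] else (s[i]?).toList) ++ pvGather rest (i + 1) s

lemma zipWith_zipWith {α β γ δ : Type} (f : γ → β → δ) (g : α → β → γ) :
    ∀ (l₁ : List α) (l₂ : List β),
      List.zipWith f (List.zipWith g l₁ l₂) l₂ = List.zipWith (fun a b => f (g a b) b) l₁ l₂ := by
  intro l₁
  induction l₁ with
  | nil => intro l₂; simp
  | cons a l₁ ih => intro l₂; cases l₂ <;> simp [ih]

lemma zipWith_self_eq {α : Type} :
    ∀ (accs : List (List α)) (msa : List (String × String)),
      accs.length = msa.length →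
      List.zipWith (fun acc (_ : String × String) => acc) accs msa = accs := by
  intro accs
  induction accs with
  | nil => intro msa _; simp
  | cons a accs ih =>
    intro msa h
    cases msa with
    | nil => simp at h
    | cons m msa => simp [ih msa (by simpa using h)]

-- Loop invariant: the column loop from column list b at offset i appends pvGather b i to each acc.
lemma pvColLoop_eq (msa : List (String × String)) :
    ∀ (b : List Char) (i : Nat) (accs : List (List Char)), accs.length = msa.length →
      pvColLoop msa b i accs
        = List.zipWith (fun acc p => acc ++ pvGather b i p.2.toList) accs msa := by
  intro b
  induction b with
  | nil =>
    intro i accs h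
    simp only [pvColLoop, pvGather, List.append_nil]
    exact (zipWith_self_eq accs msa h).symm
  | cons c rest ih =>
    intro i accs h
    by_cases hc : c = '-'
    · rw [show pvColLoop msa (c :: rest) i accs = pvColLoop msa rest (i + 1) accs from by
        simp [pvColLoop, hc]]
      rw [ih (i + 1) accs h]
      simp [pvGather, hc]
    · rw [show pvColLoop msa (c :: rest) i accs
          = pvColLoop msa rest (i + 1)
              (List.zipWith (fun acc p => acc ++ (p.2.toList[i]?).toList) accs msa) from by
        simp [pvColLoop, hc]]
      rw [ih (i + 1) _ (by simp [h])]
      rw [zipWith_zipWith]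
      simp [pvGather, hc, List.append_assoc]

lemma zipWith_map_left {α β γ : Type} (g : β → α → γ) (f : α → β) :
    ∀ (l : List α), List.zipWith g (l.map f) l = l.map (fun a => g (f a) a) := by
  intro l; induction l with
  | nil => simp
  | cons a l ih => simp [ih]

lemma zipWith_map_right {α β γ : Type} (g : α → β → γ) (f : α → β) :
    ∀ (l : List α), List.zipWith g l (l.map f) = l.map (fun a => g a (f a)) := by
  intro l; induction l with
  | nil => simp
  | cons a l ih => simp [ih]

-- pvGather equals A's index-list gather (shifted by the offset i).
lemma pvGather_eq (s : List Char) :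
    ∀ (b : List Char) (i : Nat),
      pvGather b i s
        = ((List.range b.length).filter (fun j => b.getD j ' ' ≠ '-')).filterMap
            (fun j => s[j + i]?) := by
  intro b
  induction b with
  | nil => intro i; simp [pvGather]
  | cons c rest ih =>
    intro i
    rw [show (c :: rest).length = rest.length + 1 from rfl, List.range_succ_eq_map]
    simp only [List.filter_cons, List.getD_cons_zero]
    by_cases hc : c = '-'
    · rw [if_neg (by simp [hc])]
      rw [List.filter_map, List.filterMap_map]
      simp only [Function.comp_def]
      rw [show (fun j => decide ((c :: rest).getD (j + 1) ' ' ≠ '-'))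
            = (fun j => decide (rest.getD j ' ' ≠ '-')) from by funext j; simp]
      rw [show (fun j => s[(j + 1) + i]?) = (fun j => s[j + (i + 1)]?) from by
        funext j; congr 1; omega]
      simp [pvGather, hc, ih]
    · rw [if_pos (by simp [hc])]
      rw [List.filterMap_cons, List.filter_map, List.filterMap_map]
      simp only [Function.comp_def]
      rw [show (fun j => decide ((c :: rest).getD (j + 1) ' ' ≠ '-'))
            = (fun j => decide (rest.getD j ' ' ≠ '-')) from by funext j; simp]
      rw [show (fun j => s[(j + 1) + i]?) = (fun j => s[j + (i + 1)]?) from by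
        funext j; congr 1; omega]
      cases hsi : s[(0 : Nat) + i]? with
      | none => simp [pvGather, hc, ih, show s[i]? = none from by simpa using hsi]
      | some d => simp [pvGather, hc, ih, show s[i]? = some d from by simpa using hsi]

-- ===== VERDICT (by name: the statement is the Claim_ definition above) =====
theorem msa_splicer_spec : Claim_equal_msa_splicer := by
  intro msa _ hpre
  unfold Spec_msa_splicer
  cases msa with
  | nil => exact absurd hpre (by simp [Pre_msa_splicer])
  | cons hd tl =>
    obtain ⟨n0, base⟩ := hd
    show msa_splicer _ = msa_splicer_alt _
    simp only [msa_splicer, msa_splicer_alt]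
    rw [pvColLoop_eq _ _ 0 _ (by simp)]
    rw [zipWith_map_left, zipWith_map_right]
    apply List.map_congr_left
    intro p _
    simp only [List.nil_append]
    rw [pvGather_eq]
    simp
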